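-- pv_equiv track=rewrite | github.com/pypi-data/pypi-mirror-403 | packages/snmpbox/snmpbox-0.1.1-py3-none-any.whl/snmp_manager/adaptive/adapter_generator.py | _categorize_oid
-- ===== SOURCE A (Python) =====
-- def _categorize_oid(oid: str) -> str:
--     """Categorize an OID based on its content."""
--     oid_lower = oid.lower()
--
--     if "1.3.6.1.2.1.1" in oid_lower:
--         return "system"
--     elif "1.3.6.1.2.1.2" in oid_lower:
--         return "interfaces"
--     elif any(keyword in oid_lower for keyword in ["gpon", "pon", "ont", "onu"]):
--         return "gpon"
--     elif any(keyword in oid_lower for keyword in ["cpu", "memory", "temp"]):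
--         return "performance"
--     elif any(keyword in oid_lower for keyword in ["optic", "power", "signal"]):
--         return "optical"
--     else:
--         return "general"
-- ===== SOURCE B (Python) =====
-- # B: position-major single scan — walk the string once, track the minimum priority
-- # of any keyword starting at each position; map the min priority to its category.
-- _KEYWORDS = [
--     ("1.3.6.1.2.1.1", 0), ("1.3.6.1.2.1.2", 1),
--     ("gpon", 2), ("pon", 2), ("ont", 2), ("onu", 2),
--     ("cpu", 3), ("memory", 3), ("temp", 3),
--     ("optic", 4), ("power", 4), ("signal", 4),
-- ]
-- _CATS = ["system", "interfaces", "gpon", "performance", "optical"]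
--
-- def _categorize_oid(oid: str) -> str:
--     s = oid.lower()
--     best = len(_CATS)
--     for i in range(len(s)):
--         for kw, pri in _KEYWORDS:
--             if pri < best and s.startswith(kw, i):
--                 best = pri
--     return _CATS[best] if best < len(_CATS) else "general"
-- ===== Notes on version B (the rewrite author's own statement) =====
-- stated objective: alternative
-- what changed: Replaced the keyword-major if-elif chain (one substring search per keyword) by a single position-major scan of the lowered string that keeps the minimum priority of any keyword starting at each position, mapped to its category at the end.
import Mathlib
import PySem

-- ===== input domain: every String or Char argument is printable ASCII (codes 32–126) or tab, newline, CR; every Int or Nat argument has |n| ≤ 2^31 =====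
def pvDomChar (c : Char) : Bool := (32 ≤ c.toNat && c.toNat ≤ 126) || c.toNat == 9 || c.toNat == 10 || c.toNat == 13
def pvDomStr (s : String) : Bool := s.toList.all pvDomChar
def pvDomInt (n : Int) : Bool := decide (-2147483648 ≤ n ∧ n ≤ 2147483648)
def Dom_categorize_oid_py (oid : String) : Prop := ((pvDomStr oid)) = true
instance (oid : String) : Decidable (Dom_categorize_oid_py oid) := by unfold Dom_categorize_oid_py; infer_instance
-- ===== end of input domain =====

-- B replaces A's keyword-major if-elif chain by a single position-major scan of the
-- string that tracks the minimum priority of any keyword starting at each position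
-- (objective: alternative decomposition, same asymptotic cost).

-- ===== PORT A =====
def categorize_oid_py (oid : String) : String :=
  let oid_lower := PySem.Str.lower oid
  if PySem.Str.isIn "1.3.6.1.2.1.1" oid_lower then "system"
  else if PySem.Str.isIn "1.3.6.1.2.1.2" oid_lower then "interfaces"
  else if (["gpon", "pon", "ont", "onu"].any (fun k => PySem.Str.isIn k oid_lower)) then "gpon"
  else if (["cpu", "memory", "temp"].any (fun k => PySem.Str.isIn k oid_lower)) then "performance"
  else if (["optic", "power", "signal"].any (fun k => PySem.Str.isIn k oid_lower)) then "optical"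
  else "general"

-- ===== PORT B =====
def bKeywords : List (List Char × Nat) :=
  [("1.3.6.1.2.1.1".toList, 0), ("1.3.6.1.2.1.2".toList, 1),
   ("gpon".toList, 2), ("pon".toList, 2), ("ont".toList, 2), ("onu".toList, 2),
   ("cpu".toList, 3), ("memory".toList, 3), ("temp".toList, 3),
   ("optic".toList, 4), ("power".toList, 4), ("signal".toList, 4)]

def bCats : List String := ["system", "interfaces", "gpon", "performance", "optical"]

-- the inner keyword loop at one position (suf = s[i:], so s.startswith(kw, i) = startswith suf kw)
def bStepKs (suf : List Char) (ks : List (List Char × Nat)) (b : Nat) : Nat :=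
  ks.foldl (fun b kp => if kp.2 < b && PySem.Chars.startswith suf kp.1 then kp.2 else b) b

-- the position loop: recursion over the suffixes of s
def bScan : List Char → Nat → Nat
  | [], best => best
  | c :: rest, best => bScan rest (bStepKs (c :: rest) bKeywords best)

def categorize_oid_py_alt (oid : String) : String :=
  let s := (PySem.Str.lower oid).toList
  let best := bScan s bCats.length
  if best < bCats.length then bCats.getD best "general" else "general"

-- ===== PRECONDITION & SPEC =====
def Spec_categorize_oid_py (oid : String) (out : String) : Prop := out = categorize_oid_py_alt oid
instance (oid : String) (out : String) : Decidable (Spec_categorize_oid_py oid out) := by unfold Spec_categorize_oid_py; infer_instance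

-- ===== CLAIM =====
def Claim_equal_categorize_oid_py : Prop := ∀ (oid : String), Dom_categorize_oid_py oid → Spec_categorize_oid_py oid (categorize_oid_py oid)

-- ===== LEMMAS AND PROOFS =====

-- min of m and the priorities of all keywords of ks occurring in s (as substrings)
def mKs (s : List Char) (ks : List (List Char × Nat)) (m : Nat) : Nat :=
  ks.foldl (fun m kp => if PySem.Chars.isIn kp.1 s then min m kp.2 else m) m

theorem mKs_cons (s : List Char) (kp : List Char × Nat) (ks : List (List Char × Nat)) (m : Nat) :
    mKs s (kp :: ks) m = mKs s ks (if PySem.Chars.isIn kp.1 s then min m kp.2 else m) := rfl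

theorem bStepKs_cons (suf : List Char) (kp : List Char × Nat) (ks : List (List Char × Nat)) (b : Nat) :
    bStepKs suf (kp :: ks) b =
      bStepKs suf ks (if kp.2 < b && PySem.Chars.startswith suf kp.1 then kp.2 else b) := rfl

theorem mKs_le (s : List Char) (ks : List (List Char × Nat)) (m : Nat) :
    mKs s ks m ≤ m := by
  induction ks generalizing m with
  | nil => simp [mKs]
  | cons kp ks ih =>
    rw [mKs_cons]
    split
    · exact le_trans (ih _) (Nat.min_le_left _ _)
    · exact ih m

theorem mKs_min (s : List Char) (ks : List (List Char × Nat)) (m p : Nat) :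
    mKs s ks (min m p) = min (mKs s ks m) p := by
  induction ks generalizing m with
  | nil => simp [mKs]
  | cons kp ks ih =>
    rw [mKs_cons, mKs_cons]
    split
    · have h : min (min m p) kp.2 = min (min m kp.2) p := by omega
      rw [h]; exact ih _
    · exact ih m

theorem bStepKs_le (suf : List Char) (ks : List (List Char × Nat)) (b : Nat) :
    bStepKs suf ks b ≤ b := by
  induction ks generalizing b with
  | nil => simp [bStepKs]
  | cons kp ks ih =>
    rw [bStepKs_cons]
    split
    · next h =>
      simp only [Bool.and_eq_true, decide_eq_true_eq] at h
      exact le_trans (ih _) (le_of_lt h.1)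
    · exact ih b

theorem isIn_cons (kw : List Char) (c : Char) (rest : List Char) :
    PySem.Chars.isIn kw (c :: rest) =
      (PySem.Chars.startswith (c :: rest) kw || PySem.Chars.isIn kw rest) := by
  rcases h : PySem.Chars.startswith (c :: rest) kw with _ | _
  · rcases h2 : PySem.Chars.isIn kw rest with _ | _
    · simp only [Bool.false_or]
      rw [PySem.Chars.isIn_eq_false_iff]
      intro hinf
      rcases List.infix_cons_iff.mp hinf with hp | hi
      · rw [← (PySem.Chars.startswith_iff (c :: rest) kw)] at hp
        simp [hp] at h
      · rw [← (PySem.Chars.isIn_iff_infix kw rest)] at hi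
        simp [hi] at h2
    · simp only [Bool.or_true]
      rw [PySem.Chars.isIn_iff_infix]
      exact List.infix_cons_iff.mpr (Or.inr ((PySem.Chars.isIn_iff_infix kw rest).mp h2))
  · simp only [Bool.true_or]
    rw [PySem.Chars.isIn_iff_infix]
    exact List.infix_cons_iff.mpr (Or.inl ((PySem.Chars.startswith_iff (c :: rest) kw).mp h))

-- one position step of B accounted against the substring-min of the remaining suffix
theorem step_key (c : Char) (rest : List Char) (ks : List (List Char × Nat)) :
    ∀ (best m0 : Nat),
      min best (mKs (c :: rest) ks m0) = min (bStepKs (c :: rest) ks best) (mKs rest ks m0) := by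
  induction ks with
  | nil => intro best m0; simp [mKs, bStepKs]
  | cons kp ks ih =>
    intro best m0
    rw [mKs_cons, mKs_cons, bStepKs_cons, ← ih]
    rw [isIn_cons kp.1 c rest]
    rcases hsw : PySem.Chars.startswith (c :: rest) kp.1 with _ | _ <;>
      rcases hin : PySem.Chars.isIn kp.1 rest with _ | _
    -- hsw = false, hin = false
    · simp
    -- hsw = false, hin = true
    · simp
    -- hsw = true, hin = false
    · simp only [Bool.or_false, Bool.and_true, Bool.false_eq_true, if_false, reduceIte]
      rw [mKs_min]
      rcases Nat.lt_or_ge kp.2 best with hlt | hge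
      · rw [if_pos (by simpa using hlt)]; try omega
      · rw [if_neg (by simpa using Nat.not_lt.mpr hge)]; try omega
    -- hsw = true, hin = true
    · simp only [Bool.or_true, Bool.and_true, reduceIte]
      have hy : mKs (c :: rest) ks (min m0 kp.2) ≤ min m0 kp.2 := mKs_le _ _ _
      rcases Nat.lt_or_ge kp.2 best with hlt | hge
      · rw [if_pos (by simpa using hlt)]; try omega
      · rw [if_neg (by simpa using Nat.not_lt.mpr hge)]; try omega

theorem bScan_eq (s : List Char) :
    ∀ best, best ≤ 5 → bScan s best = min best (mKs s bKeywords 5) := by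
  induction s with
  | nil =>
    intro best hb
    have h : mKs [] bKeywords 5 = 5 := by decide
    simp [bScan, h]; omega
  | cons c rest ih =>
    intro best hb
    have hstep : bStepKs (c :: rest) bKeywords best ≤ 5 :=
      le_trans (bStepKs_le _ _ _) hb
    simp only [bScan]
    rw [ih _ hstep, ← step_key]

theorem mKs_split (s : List Char) (ks1 ks2 : List (List Char × Nat)) (m : Nat) :
    mKs s (ks1 ++ ks2) m = mKs s ks2 (mKs s ks1 m) := by
  simp [mKs, List.foldl_append]

theorem mKs_const (s : List Char) (ks : List (List Char × Nat)) (p : Nat) :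
    ∀ m, (∀ kp ∈ ks, kp.2 = p) →
      mKs s ks m = if ks.any (fun kp => PySem.Chars.isIn kp.1 s) then min m p else m := by
  induction ks with
  | nil => intro m _; simp [mKs]
  | cons kp ks ih =>
    intro m h
    have hp : kp.2 = p := h kp (List.mem_cons_self ..)
    rw [mKs_cons, ih _ (fun q hq => h q (List.mem_cons_of_mem _ hq)), hp, List.any_cons]
    rcases hin : PySem.Chars.isIn kp.1 s with _ | _
    · simp only [Bool.false_or, Bool.false_eq_true, if_false]
    · simp only [if_true, Bool.true_or]
      split <;> omega

theorem categorize_oid_py_spec : Claim_equal_categorize_oid_py := by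
  intro oid _
  unfold Spec_categorize_oid_py categorize_oid_py categorize_oid_py_alt
  simp only [PySem.Str.isIn_eq, List.any_cons, List.any_nil, Bool.or_false,
    bCats, List.length_cons, List.length_nil, List.getD]
  have hs := bScan_eq ((PySem.Str.lower oid).toList) 5 (le_refl 5)
  rw [hs]
  have hle := mKs_le ((PySem.Str.lower oid).toList) bKeywords 5
  rw [show min 5 (mKs (PySem.Str.lower oid).toList bKeywords 5) =
        mKs (PySem.Str.lower oid).toList bKeywords 5 by omega]
  rw [show bKeywords =
        [("1.3.6.1.2.1.1".toList, 0)] ++ ([("1.3.6.1.2.1.2".toList, 1)] ++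
        ([("gpon".toList, 2), ("pon".toList, 2), ("ont".toList, 2), ("onu".toList, 2)] ++
        ([("cpu".toList, 3), ("memory".toList, 3), ("temp".toList, 3)] ++
         [("optic".toList, 4), ("power".toList, 4), ("signal".toList, 4)]))) from rfl]
  rw [mKs_split, mKs_split, mKs_split, mKs_split]
  rw [mKs_const _ [("1.3.6.1.2.1.1".toList, 0)] 0 _ (by decide),
      mKs_const _ [("1.3.6.1.2.1.2".toList, 1)] 1 _ (by decide),
      mKs_const _ [("gpon".toList, 2), ("pon".toList, 2), ("ont".toList, 2), ("onu".toList, 2)] 2 _ (by decide),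
      mKs_const _ [("cpu".toList, 3), ("memory".toList, 3), ("temp".toList, 3)] 3 _ (by decide),
      mKs_const _ [("optic".toList, 4), ("power".toList, 4), ("signal".toList, 4)] 4 _ (by decide)]

  simp only [List.any_cons, List.any_nil, Bool.or_false]
  generalize (PySem.Str.lower oid).toList = s
  generalize PySem.Chars.isIn "1.3.6.1.2.1.1".toList s = b1
  generalize PySem.Chars.isIn "1.3.6.1.2.1.2".toList s = b2
  generalize PySem.Chars.isIn "gpon".toList s = b3
  generalize PySem.Chars.isIn "pon".toList s = b4
  generalize PySem.Chars.isIn "ont".toList s = b5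
  generalize PySem.Chars.isIn "onu".toList s = b6
  generalize PySem.Chars.isIn "cpu".toList s = b7
  generalize PySem.Chars.isIn "memory".toList s = b8
  generalize PySem.Chars.isIn "temp".toList s = b9
  generalize PySem.Chars.isIn "optic".toList s = b10
  generalize PySem.Chars.isIn "power".toList s = b11
  generalize PySem.Chars.isIn "signal".toList s = b12
  revert b1 b2 b3 b4 b5 b6 b7 b8 b9 b10 b11 b12
  decide
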